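-- pv_equiv track=rewrite | github.com/Aece96/Cottontail_OpenPose | test.py | get_aligned_segments
-- ===== SOURCE A (Python) =====
-- def get_aligned_segments(path, min_segment_length=10):
--     aligned_segments = []  # Liste zum Speichern der ausgerichteten Segmente
--     current_segment = []  # Liste zum Speichern des aktuellen Segments
--
--     # Iteriere durch den Pfad, beginnend mit dem zweiten Element
--     for i in range(1, len(path)):
--         # Wenn das aktuelle Pfadelement in beiden Dimensionen zunimmt, gehört es zu einem ausgerichteten Segment
--         if path[i][0] > path[i - 1][0] and path[i][1] > path[i - 1][1]:
--             current_segment.append(path[i])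
--         else:
--             # Wenn das aktuelle Pfadelement nicht Teil eines ausgerichteten Segments ist,
--             # und die Länge des aktuellen Segments größer oder gleich der Mindestlänge ist,
--             # füge das aktuelle Segment der Liste der ausgerichteten Segmente hinzu
--             if len(current_segment) >= min_segment_length:
--                 aligned_segments.append(current_segment)
--             # Setze das aktuelle Segment zurück
--             current_segment = []
--
--     # Überprüfe, ob das letzte Segment die Mindestlänge erfüllt
--     if len(current_segment) >= min_segment_length:
--         aligned_segments.append(current_segment)
--
--     # Gibt die Liste der ausgerichteten Segmente zurück
--     return [pair for sublist in aligned_segments for pair in sublist]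
-- ===== SOURCE B (Python) =====
-- def get_aligned_segments(path, min_segment_length=10):
--     # Mark each step with whether it strictly increases in both coordinates,
--     # paired with the later endpoint, then emit maximal true-runs long enough.
--     flagged = [(a[0] < b[0] and a[1] < b[1], b) for a, b in zip(path, path[1:])]
--     out = []
--     rest = flagged
--     while rest:
--         if rest[0][0]:
--             k = 0
--             while k < len(rest) and rest[k][0]:
--                 k += 1
--             if k >= min_segment_length:
--                 out.extend(p for _, p in rest[:k])
--             rest = rest[k:]
--         else:
--             rest = rest[1:]
--     return out
-- ===== Notes on version B (the rewrite author's own statement) =====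
-- stated objective: alternative
-- what changed: A accumulates a current segment and flushes it into a list of segments that is flattened at the end; B instead builds a flagged step list (increasing? , endpoint) via zip and scans it as maximal True-runs, emitting each long-enough run directly.
import Mathlib
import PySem

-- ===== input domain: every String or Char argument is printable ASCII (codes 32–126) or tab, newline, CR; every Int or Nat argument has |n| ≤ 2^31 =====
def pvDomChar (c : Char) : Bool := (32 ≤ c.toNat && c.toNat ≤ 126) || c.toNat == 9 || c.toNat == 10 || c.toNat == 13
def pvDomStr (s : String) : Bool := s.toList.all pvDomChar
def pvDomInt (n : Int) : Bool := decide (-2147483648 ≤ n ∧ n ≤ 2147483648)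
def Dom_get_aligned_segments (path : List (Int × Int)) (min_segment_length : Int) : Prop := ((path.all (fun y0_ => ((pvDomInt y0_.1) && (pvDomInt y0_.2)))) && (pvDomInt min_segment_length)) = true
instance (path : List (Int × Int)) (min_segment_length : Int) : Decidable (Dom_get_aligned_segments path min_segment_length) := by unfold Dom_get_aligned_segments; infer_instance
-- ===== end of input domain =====

-- B replaces A's accumulate-and-flush segment builder by a step-indicator list scanned as maximal
-- increasing runs (alternative decomposition, same cost).

-- ===== PORT A =====
def get_aligned_segments (path : List (Int × Int)) (min_segment_length : Int) : List (Int × Int) :=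
  -- state: (aligned_segments, current_segment); loop 'for i in range(1, len(path))'
  let st :=
    (PySem.List.pyRange 1 (path.length : Int) 1).foldl
      (fun (s : List (List (Int × Int)) × List (Int × Int)) i =>
        let pi := PySem.List.pyGetD path i ((0 : Int), (0 : Int))
        let pim := PySem.List.pyGetD path (i - 1) ((0 : Int), (0 : Int))
        if pi.1 > pim.1 ∧ pi.2 > pim.2 then (s.1, s.2 ++ [pi])
        else if (s.2.length : Int) ≥ min_segment_length then (s.1 ++ [s.2], [])
        else (s.1, []))
      ([], [])
  let segs := if (st.2.length : Int) ≥ min_segment_length then st.1 ++ [st.2] else st.1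
  segs.flatMap id

-- ===== PORT B =====
-- 'k = 0; while k < len(rest) and rest[k][0]: k += 1' — count of leading True flags
def pvRunLen : List (Bool × (Int × Int)) → Nat
  | (true, _) :: t => pvRunLen t + 1
  | (false, _) :: _ => 0
  | [] => 0

theorem pvRunLen_pos (p : Int × Int) (t : List (Bool × (Int × Int))) :
    1 ≤ pvRunLen ((true, p) :: t) := by simp [pvRunLen]

-- 'while rest: …' — consume one flagged step or one whole run per iteration
def pvBLoop (m : Int) : List (Bool × (Int × Int)) → List (Int × Int)
  | [] => []
  | (false, _) :: t => pvBLoop m t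
  | (true, p) :: t =>
      let k := pvRunLen ((true, p) :: t)
      (if (k : Int) ≥ m then (((true, p) :: t).take k).map (·.2) else [])
        ++ pvBLoop m (((true, p) :: t).drop k)
termination_by l => l.length
decreasing_by all_goals (simp; try exact pvRunLen_pos p t)

def get_aligned_segments_alt (path : List (Int × Int)) (min_segment_length : Int) : List (Int × Int) :=
  -- flagged = [(a[0] < b[0] and a[1] < b[1], b) for a, b in zip(path, path[1:])]
  let flagged := (path.zip path.tail).map
    (fun ab => (decide (ab.1.1 < ab.2.1 ∧ ab.1.2 < ab.2.2), ab.2))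
  pvBLoop min_segment_length flagged

-- ===== PRECONDITION & SPEC =====
def Spec_get_aligned_segments (path : List (Int × Int)) (min_segment_length : Int) (out : List (Int × Int)) : Prop := out = get_aligned_segments_alt path min_segment_length
instance (path : List (Int × Int)) (min_segment_length : Int) (out : List (Int × Int)) : Decidable (Spec_get_aligned_segments path min_segment_length out) := by unfold Spec_get_aligned_segments; infer_instance

-- ===== CLAIM (what is proved, stated in full; the proofs are below) =====
def Claim_equal_get_aligned_segments : Prop := ∀ (path : List (Int × Int)) (min_segment_length : Int), Dom_get_aligned_segments path min_segment_length → Spec_get_aligned_segments path min_segment_length (get_aligned_segments path min_segment_length)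

-- ===== LEMMAS AND PROOFS =====

-- the flag-and-endpoint view of one step (B's list-comprehension body)
def pvFlag (ab : (Int × Int) × (Int × Int)) : Bool × (Int × Int) :=
  (decide (ab.1.1 < ab.2.1 ∧ ab.1.2 < ab.2.2), ab.2)

-- A's loop body on a flagged step
def pvStepFl (m : Int) (s : List (List (Int × Int)) × List (Int × Int))
    (fp : Bool × (Int × Int)) : List (List (Int × Int)) × List (Int × Int) :=
  if fp.1 then (s.1, s.2 ++ [fp.2])
  else if (s.2.length : Int) ≥ m then (s.1 ++ [s.2], [])
  else (s.1, [])

-- A's finalization + flattening applied to a loop state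
def pvFin (m : Int) (s : List (List (Int × Int)) × List (Int × Int)) : List (Int × Int) :=
  (if (s.2.length : Int) ≥ m then s.1 ++ [s.2] else s.1).flatMap id

-- A's flush discipline, with the pending current segment made explicit
def pvRunA (m : Int) (cur : List (Int × Int)) : List (Bool × (Int × Int)) → List (Int × Int)
  | [] => if (cur.length : Int) ≥ m then cur else []
  | (true, p) :: t => pvRunA m (cur ++ [p]) t
  | (false, _) :: t => (if (cur.length : Int) ≥ m then cur else []) ++ pvRunA m [] t

-- generic: an index loop over range(len l) reading l[k] is a fold over l
theorem pv_foldl_range_getD {α β : Type} (l : List α) (d : α) (f : β → α → β) (init : β) :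
    (List.range l.length).foldl (fun s k => f s (l.getD k d)) init = l.foldl f init := by
  induction l using List.reverseRecOn generalizing init with
  | nil => simp
  | append_singleton l x ih =>
      rw [List.length_append, List.length_singleton, List.range_succ, List.foldl_append]
      have h1 : List.foldl (fun s k => f s ((l ++ [x]).getD k d)) init (List.range l.length)
          = List.foldl (fun s k => f s (l.getD k d)) init (List.range l.length) := by
        apply PySem.List.foldl_congr_mem
        intro acc k hk
        rw [List.getD_append l [x] d k (by simpa using hk)]
      rw [h1, ih, List.foldl_append]
      simp [List.getD_eq_getElem?_getD]

-- A's index loop over range(1, len(path)) is the fold of pvStepFl over the flagged steps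
theorem pv_key (path : List (Int × Int)) (m : Int)
    (init : List (List (Int × Int)) × List (Int × Int)) :
    (PySem.List.pyRange 1 (path.length : Int) 1).foldl
      (fun (s : List (List (Int × Int)) × List (Int × Int)) i =>
        let pi := PySem.List.pyGetD path i ((0 : Int), (0 : Int))
        let pim := PySem.List.pyGetD path (i - 1) ((0 : Int), (0 : Int))
        if pi.1 > pim.1 ∧ pi.2 > pim.2 then (s.1, s.2 ++ [pi])
        else if (s.2.length : Int) ≥ m then (s.1 ++ [s.2], [])
        else (s.1, []))
      init
      = ((path.zip path.tail).map pvFlag).foldl (pvStepFl m) init := by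
  have hlen : (((path.length : Int)) - 1).toNat = (path.zip path.tail).length := by
    simp only [List.length_zip, List.length_tail]
    omega
  rw [PySem.List.pyRange_one 1 (path.length : Int), hlen, List.foldl_map, List.foldl_map,
    ← pv_foldl_range_getD (path.zip path.tail) (((0:Int),(0:Int)),((0:Int),(0:Int)))
      (fun s ab => pvStepFl m s (pvFlag ab)) init]
  apply PySem.List.foldl_congr_mem
  intro acc k hk
  rw [List.mem_range] at hk
  have hk1 : k + 1 < path.length := by
    have := List.length_zip (l₁ := path) (l₂ := path.tail)
    simp at this
    omega
  have hk0 : k < path.length := by omega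
  have e1 : PySem.List.pyGetD path (1 + (k : Int)) ((0:Int),(0:Int)) = path[k+1] := by
    rw [show (1 + (k : Int)) = ((k + 1 : Nat) : Int) by push_cast; ring]
    rw [PySem.List.pyGetD_natCast, List.getD_eq_getElem _ _ hk1]
  have e2 : PySem.List.pyGetD path (1 + (k : Int) - 1) ((0:Int),(0:Int)) = path[k] := by
    rw [show (1 + (k : Int) - 1) = ((k : Nat) : Int) by ring]
    rw [PySem.List.pyGetD_natCast, List.getD_eq_getElem _ _ hk0]
  have e3 : (path.zip path.tail).getD k (((0:Int),(0:Int)),((0:Int),(0:Int)))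
      = (path[k], path[k+1]) := by
    rw [List.getD_eq_getElem _ _ hk, List.getElem_zip]
    congr 1
    rw [List.getElem_tail]
  simp only [e1, e2, e3, pvStepFl, pvFlag, gt_iff_lt, decide_eq_true_eq]

-- folding pvStepFl then finalizing = already-flushed output ++ pvRunA on the rest
theorem pvFin_foldl (m : Int) (fl : List (Bool × (Int × Int)))
    (segs : List (List (Int × Int))) (cur : List (Int × Int)) :
    pvFin m (fl.foldl (pvStepFl m) (segs, cur)) = segs.flatMap id ++ pvRunA m cur fl := by
  induction fl generalizing segs cur with
  | nil =>
    simp only [List.foldl_nil, pvFin, pvRunA]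
    split_ifs <;> simp
  | cons hd t ih =>
    obtain ⟨f, p⟩ := hd
    cases f
    · simp only [List.foldl_cons, pvStepFl, if_neg (by simp : ¬ ((false, p).1 = true))]
      by_cases h : ((cur.length : Int) ≥ m)
      · rw [if_pos h, ih]
        simp [pvRunA, if_pos h, List.append_assoc]
      · rw [if_neg h, ih]
        simp [pvRunA, if_neg h]
    · simp only [List.foldl_cons, pvStepFl]
      rw [ih]
      rfl

theorem pvA_eq_runA (path : List (Int × Int)) (m : Int) :
    get_aligned_segments path m = pvRunA m [] ((path.zip path.tail).map pvFlag) := by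
  simp only [get_aligned_segments]
  rw [pv_key]
  have h := pvFin_foldl m ((path.zip path.tail).map pvFlag) [] []
  simp only [pvFin, List.flatMap_nil, List.nil_append] at h
  exact h

-- the flush of a maximal leading run followed by pvBLoop on the rest IS pvBLoop
theorem pv_run_split_eq_BLoop (m : Int) (t : List (Bool × (Int × Int))) :
    (if ((pvRunLen t : Nat) : Int) ≥ m then (t.take (pvRunLen t)).map (·.2) else [])
        ++ pvBLoop m (t.drop (pvRunLen t)) = pvBLoop m t := by
  match t with
  | [] => simp [pvRunLen, pvBLoop]
  | (false, q) :: t' => simp [pvRunLen, pvBLoop]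
  | (true, p) :: t' => conv_rhs => rw [pvBLoop]

-- pvRunA with pending segment cur = flush of the current run, then pvBLoop on the remainder
theorem pvRunA_eq_run_split (m : Int) (fl : List (Bool × (Int × Int))) (cur : List (Int × Int)) :
    pvRunA m cur fl
      = (if ((cur.length + pvRunLen fl : Nat) : Int) ≥ m
            then cur ++ (fl.take (pvRunLen fl)).map (·.2) else [])
          ++ pvBLoop m (fl.drop (pvRunLen fl)) := by
  induction fl generalizing cur with
  | nil => simp [pvRunA, pvRunLen, pvBLoop]
  | cons hd t ih =>
    obtain ⟨f, p⟩ := hd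
    cases f
    · have h0 : pvRunA m ([] : List (Int × Int)) t = pvBLoop m t := by
        rw [ih]; simpa using pv_run_split_eq_BLoop m t
      simp [pvRunA, pvRunLen, pvBLoop, h0]
    · rw [show pvRunA m cur ((true, p) :: t) = pvRunA m (cur ++ [p]) t from rfl, ih]
      simp only [pvRunLen, List.take_succ_cons, List.drop_succ_cons, List.map_cons,
        List.length_append, List.length_cons, List.length_nil]
      have hc : cur.length + 0 + 1 + pvRunLen t = cur.length + (pvRunLen t + 1) := by omega
      rw [hc, List.append_assoc]
      rfl

-- ===== VERDICT (by name: the statement is the Claim_ definition above) =====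
theorem get_aligned_segments_spec : Claim_equal_get_aligned_segments := by
  intro path m _
  show get_aligned_segments path m = get_aligned_segments_alt path m
  rw [pvA_eq_runA path m, pvRunA_eq_run_split]
  have h := pv_run_split_eq_BLoop m ((path.zip path.tail).map pvFlag)
  simp only [List.length_nil, Nat.zero_add, List.nil_append] at h ⊢
  rw [h]
  rfl
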